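-- pv_equiv track=rewrite | github.com/thivian17/LectureLink-2.0 | packages/api/src/lecturelink_api/services/gamification.py | get_level_thresholds
-- ===== SOURCE A (Python) =====
-- def get_level_thresholds(max_level: int = 50) -> list[int]:
--     """Generate Fibonacci-style XP thresholds."""
--     thresholds = [0, 100]
--     increments = [100, 200]
--     for _ in range(2, max_level):
--         next_inc = increments[-1] + increments[-2]
--         increments.append(next_inc)
--         thresholds.append(thresholds[-1] + next_inc)
--     return thresholds
-- ===== SOURCE B (Python) =====
-- def get_level_thresholds(max_level: int = 50) -> list[int]:
--     """Generate Fibonacci-style XP thresholds: build the increments first, then prefix-sum them."""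
--     if max_level <= 2:
--         return [0, 100]
--     incs = [100, 200]
--     while len(incs) < max_level:
--         incs.append(incs[-1] + incs[-2])
--     out = [0]
--     total = 0
--     for d in [100] + incs[2:]:
--         total += d
--         out.append(total)
--     return out
-- ===== Notes on version B (the rewrite author's own statement) =====
-- stated objective: alternative
-- what changed: A interleaves increment generation and threshold accumulation in one loop; B first generates the full Fibonacci increment list, then builds the thresholds as a separate prefix-sum pass.
import Mathlib
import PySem

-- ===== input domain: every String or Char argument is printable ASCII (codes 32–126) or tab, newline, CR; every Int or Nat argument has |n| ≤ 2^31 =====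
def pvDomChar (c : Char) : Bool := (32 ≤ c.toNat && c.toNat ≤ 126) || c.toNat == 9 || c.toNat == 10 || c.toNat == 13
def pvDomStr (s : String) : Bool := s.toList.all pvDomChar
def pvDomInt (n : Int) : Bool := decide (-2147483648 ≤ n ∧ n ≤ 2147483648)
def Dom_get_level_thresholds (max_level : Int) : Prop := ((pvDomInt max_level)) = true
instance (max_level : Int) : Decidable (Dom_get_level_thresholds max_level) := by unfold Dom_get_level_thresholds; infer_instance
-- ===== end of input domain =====

-- B builds the increment list first and then prefix-sums it, instead of A's single interleaved loop (alternative decomposition, same cost).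

-- ===== PORT A =====
-- the body of A's 'for _ in range(2, max_level)' loop, iterated (max_level-2).toNat times;
-- increments[-1]/[-2] and thresholds[-1] via PySem.List.pyGet? (always some: the lists never shrink below length 2)
def goA : Nat → List Int → List Int → List Int
  | 0, thresholds, _ => thresholds
  | n + 1, thresholds, increments =>
      let next_inc := (PySem.List.pyGet? increments (-1)).getD 0 + (PySem.List.pyGet? increments (-2)).getD 0
      goA n (thresholds ++ [(PySem.List.pyGet? thresholds (-1)).getD 0 + next_inc]) (increments ++ [next_inc])

def get_level_thresholds (max_level : Int) : List Int :=
  goA (max_level - 2).toNat [0, 100] [100, 200]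

-- ===== PORT B =====
-- B's 'while len(incs) < max_level: incs.append(incs[-1]+incs[-2])'; n = max_level (≥ 3 at the call site)
def buildIncs (n : Nat) (incs : List Int) : List Int :=
  if _h : incs.length < n then
    buildIncs n (incs ++ [(PySem.List.pyGet? incs (-1)).getD 0 + (PySem.List.pyGet? incs (-2)).getD 0])
  else incs
termination_by n - incs.length
decreasing_by simp; omega

def get_level_thresholds_alt (max_level : Int) : List Int :=
  if max_level ≤ 2 then [0, 100]
  else
    let incs := buildIncs max_level.toNat [100, 200]
    -- incs[2:] : slicing from nonnegative 2 equals drop 2 in Python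
    let steps := 100 :: incs.drop 2
    (steps.foldl (fun (st : List Int × Int) d => (st.1 ++ [st.2 + d], st.2 + d)) ([0], 0)).1

-- ===== PRECONDITION & SPEC =====
def Spec_get_level_thresholds (max_level : Int) (out : List Int) : Prop := out = get_level_thresholds_alt max_level
instance (max_level : Int) (out : List Int) : Decidable (Spec_get_level_thresholds max_level out) := by unfold Spec_get_level_thresholds; infer_instance

-- ===== CLAIM (what is proved, stated in full; the proofs are below) =====
def Claim_equal_get_level_thresholds : Prop := ∀ (max_level : Int), Dom_get_level_thresholds max_level → Spec_get_level_thresholds max_level (get_level_thresholds max_level)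

-- ===== LEMMAS AND PROOFS =====

-- common "spec" sequences used only by the proofs
def specGo : Nat → Int → Int → Int → List Int
  | 0, _, _, _ => []
  | n + 1, a, b, t => (t + (a + b)) :: specGo n b (a + b) (t + (a + b))

def incSpec : Nat → Int → Int → List Int
  | 0, _, _ => []
  | n + 1, a, b => (a + b) :: incSpec n b (a + b)

lemma pyGet_neg1 (zs : List Int) (t : Int) :
    PySem.List.pyGet? (zs ++ [t]) (-1) = some t :=
  PySem.List.pyGet?_neg_one_append_singleton zs t

lemma pyGet_neg2 (ys : List Int) (a b : Int) :
    PySem.List.pyGet? (ys ++ [a, b]) (-2) = some a := by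
  rw [show ys ++ [a, b] = (ys ++ [a]) ++ [b] by simp,
      PySem.List.pyGet?_neg_ofNat _ 2 (by omega) (by simp)]
  simp

lemma goA_eq (n : ℕ) : ∀ (zs ys : List Int) (t a b : Int),
    goA n (zs ++ [t]) (ys ++ [a, b]) = (zs ++ [t]) ++ specGo n a b t := by
  induction n with
  | zero => intro zs ys t a b; simp [goA, specGo]
  | succ n ih =>
      intro zs ys t a b
      have h1 : PySem.List.pyGet? (ys ++ [a, b]) (-1) = some b := by
        rw [show ys ++ [a, b] = (ys ++ [a]) ++ [b] by simp]; exact pyGet_neg1 _ _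
      rw [goA]
      simp only [h1, pyGet_neg2, pyGet_neg1, Option.getD_some]
      have hc : b + a = a + b := by ring
      rw [hc]
      rw [show ((ys ++ [a, b]) ++ [a + b]) = (ys ++ [a]) ++ [b, a + b] by simp]
      rw [ih (zs ++ [t]) (ys ++ [a]) (t + (a + b)) b (a + b)]
      simp [specGo, List.append_assoc]

lemma buildIncs_eq (k : ℕ) : ∀ (n : ℕ) (ys : List Int) (a b : Int),
    n = (ys ++ [a, b]).length + k →
    buildIncs n (ys ++ [a, b]) = (ys ++ [a, b]) ++ incSpec k a b := by
  induction k with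
  | zero =>
      intro n ys a b hn
      rw [buildIncs, dif_neg (by omega : ¬ (ys ++ [a, b]).length < n)]
      simp [incSpec]
  | succ k ih =>
      intro n ys a b hn
      have hn' : n = ys.length + 2 + (k + 1) := by simpa using hn
      have h1 : PySem.List.pyGet? (ys ++ [a, b]) (-1) = some b := by
        rw [show ys ++ [a, b] = (ys ++ [a]) ++ [b] by simp]; exact pyGet_neg1 _ _
      rw [buildIncs, dif_pos (by omega : (ys ++ [a, b]).length < n)]
      simp only [h1, pyGet_neg2, Option.getD_some]
      have hc : b + a = a + b := by ring
      rw [hc]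
      rw [show ((ys ++ [a, b]) ++ [a + b]) = (ys ++ [a]) ++ [b, a + b] by simp]
      rw [ih n (ys ++ [a]) b (a + b) (by simp; omega)]
      simp [incSpec, List.append_assoc]

lemma foldl_incSpec (k : ℕ) : ∀ (a b t : Int) (out : List Int),
    ((incSpec k a b).foldl (fun (st : List Int × Int) d => (st.1 ++ [st.2 + d], st.2 + d)) (out, t)).1
      = out ++ specGo k a b t := by
  induction k with
  | zero => intro a b t out; simp [incSpec, specGo]
  | succ k ih =>
      intro a b t out
      simp only [incSpec, List.foldl_cons]
      rw [ih]
      simp [specGo, List.append_assoc]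

-- ===== VERDICT (by name: the statement is the Claim_ definition above) =====
theorem get_level_thresholds_spec : Claim_equal_get_level_thresholds := by
  intro m _
  unfold Spec_get_level_thresholds get_level_thresholds get_level_thresholds_alt
  by_cases h : m ≤ 2
  · rw [if_pos h]
    have : (m - 2).toNat = 0 := by omega
    rw [this]; rfl
  · rw [if_neg h]
    have hA : goA (m - 2).toNat [0, 100] [100, 200]
        = [0, 100] ++ specGo (m - 2).toNat 100 200 100 := by
      simpa using goA_eq (m - 2).toNat [0] [] 100 100 200
    have hB : buildIncs m.toNat [100, 200] = [100, 200] ++ incSpec (m.toNat - 2) 100 200 := by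
      simpa using buildIncs_eq (m.toNat - 2) m.toNat [] 100 200 (by simp; omega)
    simp only [hB]
    rw [show (([100, 200] : List Int) ++ incSpec (m.toNat - 2) 100 200).drop 2
          = incSpec (m.toNat - 2) 100 200 from rfl]
    simp only [List.foldl_cons]
    norm_num
    rw [foldl_incSpec, hA, show (m - 2).toNat = m.toNat - 2 by omega]
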